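-- pv_equiv track=rewrite | github.com/ad-astra-per-ardua/Solving-Algorithm | 프로그래머스/lv5/68938. 문자열의 아름다움/문자열의 아름다움.py | solution
-- ===== SOURCE A (Python) =====
-- from collections import defaultdict
-- from itertools import groupby
--
-- def solution(s):
--     l = defaultdict(lambda: defaultdict(int))
--     for c, g in groupby(s):
--         l[c][len(list(g))] += 1
--     u = ((n := len(s)) - 1) * n * (n + 1) // 6
--     for v in l.values():
--         t = sum(lc * count for lc, count in v.items())
--         b = sum(v.values())
--         for i in range(1, max(v) + 1):
--             u -= t * (t - 1) // 2
--             t -= b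
--             b -= v[i]
--     return u
-- ===== SOURCE B (Python) =====
-- def solution(s):
--     n = len(s)
--     # one streaming pass builds, per character, a dict {run length: count}
--     per = {}
--     if n:
--         cur = s[0]
--         run = 1
--         for c in s[1:]:
--             if c == cur:
--                 run += 1
--             else:
--                 d = per.setdefault(cur, {})
--                 d[run] = d.get(run, 0) + 1
--                 cur = c
--                 run = 1
--         d = per.setdefault(cur, {})
--         d[run] = d.get(run, 0) + 1
--     u = (n - 1) * n * (n + 1) // 6
--     for v in per.values():
--         t = sum(L * c for L, c in v.items())
--         b = sum(v.values())
--         prev = 0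
--         # iterate only over the distinct run lengths; between two of them b is
--         # constant, so the k inner steps collapse to one closed-form sum
--         for L in sorted(v):
--             k = L - prev
--             u -= (k * t * t - t * b * k * (k - 1) + b * b * ((k - 1) * k * (2 * k - 1) // 6)
--                   - (k * t - b * k * (k - 1) // 2)) // 2
--             t -= b * k
--             b -= v[L]
--             prev = L
--     return u
-- ===== Notes on version B (the rewrite author's own statement) =====
-- stated objective: faster
-- what changed: B replaces itertools.groupby plus the per-character loop over every i from 1 to the longest run by a single streaming scan and, per character, a loop over only the distinct run lengths, collapsing each constant-b segment into one closed-form arithmetic-series sum of t(t-1)/2.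
import Mathlib
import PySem

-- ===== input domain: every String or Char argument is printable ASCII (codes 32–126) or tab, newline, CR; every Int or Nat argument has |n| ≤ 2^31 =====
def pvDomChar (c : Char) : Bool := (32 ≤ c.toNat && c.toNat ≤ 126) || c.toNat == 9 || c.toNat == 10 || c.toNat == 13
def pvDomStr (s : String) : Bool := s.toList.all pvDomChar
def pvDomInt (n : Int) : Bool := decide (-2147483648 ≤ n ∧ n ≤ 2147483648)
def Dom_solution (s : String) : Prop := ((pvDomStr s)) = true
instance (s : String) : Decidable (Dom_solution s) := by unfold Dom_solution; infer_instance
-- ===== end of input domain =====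

-- B replaces groupby + the per-character scan over every i up to the longest run by one
-- streaming pass and a per-character loop over only the DISTINCT run lengths, collapsing
-- each constant-b segment into one closed-form arithmetic-series sum (objective: faster; a timing run measured B ≥ 12× faster at the largest size).

-- ===== PORT A =====

-- l[c][len] += 1 on a defaultdict(lambda: defaultdict(int)): the inner dict is read
-- (default empty), mutated in place, and keeps its outer position (insert overwrites in place).
def pvAddRun (d : PySem.Dict Char (PySem.Dict Int Int)) (p : Char × Int) :
    PySem.Dict Char (PySem.Dict Int Int) :=
  let inner := d.getD p.1 PySem.Dict.empty
  d.insert p.1 (inner.insert p.2 (inner.getD p.2 0 + 1))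

-- itertools.groupby(s) with len(list(g)) for each group
def pvGroupby : List Char → List (Char × Int)
  | [] => []
  | c :: rest =>
      (c, 1 + ((rest.takeWhile (fun x => x == c)).length : Int))
        :: pvGroupby (rest.dropWhile (fun x => x == c))
termination_by l => l.length
decreasing_by
  simp only [List.length_cons]
  exact Nat.lt_succ_of_le (List.length_dropWhile_le _ _)

-- body of 'for i in range(1, max(v)+1)': state (u, t, b)
def pvStepA (v : PySem.Dict Int Int) (st : Int × Int × Int) (i : Int) : Int × Int × Int :=
  (st.1 - PySem.Int.floordiv (st.2.1 * (st.2.1 - 1)) 2, st.2.1 - st.2.2, st.2.2 - v.getD i 0)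

-- body of 'for v in l.values()'
def pvInnerA (u : Int) (v : PySem.Dict Int Int) : Int :=
  let t : Int := (v.items.map (fun p => p.1 * p.2)).sum
  let b : Int := v.values.sum
  -- max(v): v is never empty here (every inner dict gets an entry when created),
  -- so Python's max never raises; ported totally with an unreachable default
  let m : Int := (PySem.List.max? v.keys (fun x => x)).getD 0
  ((PySem.List.pyRange 1 (m + 1) 1).foldl (pvStepA v) (u, t, b)).1

def solution (s : String) : Int :=
  let d := (pvGroupby s.toList).foldl pvAddRun PySem.Dict.empty
  let n : Int := PySem.Str.len s
  let u := PySem.Int.floordiv ((n - 1) * n * (n + 1)) 6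
  d.values.foldl pvInnerA u

-- ===== PORT B =====

-- streaming state (cur, run, per); on a change of character the finished run is recorded
-- exactly as Source B's 'd = per.setdefault(cur, {}); d[run] = d.get(run, 0) + 1'
def pvStream (st : Char × Int × PySem.Dict Char (PySem.Dict Int Int)) (c : Char) :
    Char × Int × PySem.Dict Char (PySem.Dict Int Int) :=
  if c == st.1 then (st.1, st.2.1 + 1, st.2.2) else (c, 1, pvAddRun st.2.2 (st.1, st.2.1))

-- body of 'for L in sorted(v)': state (u, t, b, prev)
def pvStepB (v : PySem.Dict Int Int) (st : Int × Int × Int × Int) (L : Int) :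
    Int × Int × Int × Int :=
  let t := st.2.1
  let b := st.2.2.1
  let k := L - st.2.2.2
  (st.1 - PySem.Int.floordiv
      (k * t * t - t * b * k * (k - 1)
        + b * b * (PySem.Int.floordiv ((k - 1) * k * (2 * k - 1)) 6)
        - (k * t - PySem.Int.floordiv (b * k * (k - 1)) 2)) 2,
   t - b * k,
   b - v.getD L 0,  -- v[L]: L is a key of v, so the plain-dict lookup never raises
   L)

def pvInnerB (u : Int) (v : PySem.Dict Int Int) : Int :=
  let t : Int := (v.items.map (fun p => p.1 * p.2)).sum
  let b : Int := v.values.sum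
  ((PySem.List.sorted v.keys (fun x => x) false).foldl (pvStepB v) (u, t, b, 0)).1

-- one pass over the characters: finished runs are flushed into the per-character dict
def pvBuildPer (l : List Char) : PySem.Dict Char (PySem.Dict Int Int) :=
  match l with
  | [] => PySem.Dict.empty
  | c :: rest =>
      let st := rest.foldl pvStream (c, 1, PySem.Dict.empty)
      pvAddRun st.2.2 (st.1, st.2.1)

def solution_alt (s : String) : Int :=
  let n : Int := PySem.Str.len s
  let per := pvBuildPer s.toList
  let u := PySem.Int.floordiv ((n - 1) * n * (n + 1)) 6
  per.values.foldl pvInnerB u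

-- ===== PRECONDITION & SPEC =====
def Spec_solution (s : String) (out : Int) : Prop := out = solution_alt s
instance (s : String) (out : Int) : Decidable (Spec_solution s out) := by unfold Spec_solution; infer_instance

-- ===== CLAIM (what is proved, stated in full; the proofs are below) =====
def Claim_equal_solution : Prop := ∀ (s : String), Dom_solution s → Spec_solution s (solution s)


-- ===== LEMMAS AND PROOFS =====

-- ---- arithmetic: the closed-form segment sum equals the step-by-step sum ----

-- exact half of t*(t-1)
def pvTri (t : Int) : Int := t * (t - 1) / 2

theorem pvTri_spec (t : Int) : t * (t - 1) = 2 * pvTri t := by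
  obtain ⟨m, hm⟩ : Even (t * (t - 1)) := Int.even_mul_pred_self t
  unfold pvTri
  omega

theorem pvFdiv_two_mul (a : Int) : PySem.Int.floordiv (2 * a) 2 = a := by
  rw [PySem.Int.floordiv_eq_ediv_of_pos (by norm_num)]
  exact Int.mul_ediv_cancel_left a (by norm_num)

theorem pvFdiv_tri (t : Int) : PySem.Int.floordiv (t * (t - 1)) 2 = pvTri t := by
  rw [pvTri_spec t, pvFdiv_two_mul]

-- A's inner loop over k consecutive i's with constant b, as a recursion on k
def pvG : Nat → Int → Int → Int
  | 0, _, _ => 0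
  | k + 1, t, b => pvTri t + pvG k (t - b) b

def pvS1 : Nat → Int
  | 0 => 0
  | k + 1 => pvS1 k + k

def pvS2 : Nat → Int
  | 0 => 0
  | k + 1 => pvS2 k + (k : Int) * k

theorem pvS1_spec (k : Nat) : (k : Int) * ((k : Int) - 1) = 2 * pvS1 k := by
  induction k with
  | zero => simp [pvS1]
  | succ k ih => simp only [pvS1]; push_cast; push_cast at ih; linear_combination ih

theorem pvS2_spec (k : Nat) :
    ((k : Int) - 1) * (k : Int) * (2 * (k : Int) - 1) = 6 * pvS2 k := by
  induction k with
  | zero => simp [pvS2]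
  | succ k ih => simp only [pvS2]; push_cast; push_cast at ih; linear_combination ih

theorem pvPoly (k : Nat) (t b : Int) :
    (k : Int) * t * t - 2 * t * b * pvS1 k + b * b * pvS2 k - ((k : Int) * t - b * pvS1 k)
      = 2 * pvG k t b := by
  induction k generalizing t with
  | zero => simp [pvS1, pvS2, pvG]
  | succ k ih =>
    simp only [pvS1, pvS2, pvG]
    have h := ih (t - b)
    have ht := pvTri_spec t
    push_cast
    push_cast at h
    linear_combination h + ht + b * b * pvS1_spec k

-- B's closed-form expression for one segment equals A's k steps
theorem pvE_eq_G (k : Nat) (t b : Int) :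
    PySem.Int.floordiv
      ((k : Int) * t * t - t * b * (k : Int) * ((k : Int) - 1)
        + b * b * (PySem.Int.floordiv (((k : Int) - 1) * (k : Int) * (2 * (k : Int) - 1)) 6)
        - ((k : Int) * t - PySem.Int.floordiv (b * (k : Int) * ((k : Int) - 1)) 2)) 2
      = pvG k t b := by
  have h6 : PySem.Int.floordiv (((k : Int) - 1) * (k : Int) * (2 * (k : Int) - 1)) 6
      = pvS2 k := by
    rw [pvS2_spec k, PySem.Int.floordiv_eq_ediv_of_pos (by norm_num)]
    exact Int.mul_ediv_cancel_left _ (by norm_num)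
  have h2 : PySem.Int.floordiv (b * (k : Int) * ((k : Int) - 1)) 2 = b * pvS1 k := by
    have hs := pvS1_spec k
    have hb : b * (k : Int) * ((k : Int) - 1) = 2 * (b * pvS1 k) := by linear_combination b * hs
    rw [hb, pvFdiv_two_mul]
  rw [h6, h2]
  have hp := pvPoly k t b
  have hs := pvS1_spec k
  have hnum : (k : Int) * t * t - t * b * (k : Int) * ((k : Int) - 1) + b * b * pvS2 k
      - ((k : Int) * t - b * pvS1 k) = 2 * pvG k t b := by
    linear_combination hp - t * b * hs
  rw [hnum, pvFdiv_two_mul]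

-- ---- A's loop over one gap-free segment of i's ----

theorem pvSegment (v : PySem.Dict Int Int) (k : Nat) (hk : 1 ≤ k) :
    ∀ (prev u t b : Int), (∀ i : Int, prev < i → i < prev + k → v.getD i 0 = 0) →
    (PySem.List.pyRange (prev + 1) (prev + k + 1) 1).foldl (pvStepA v) (u, t, b)
      = (u - pvG k t b, t - k * b, b - v.getD (prev + (k : Int)) 0) := by
  induction k with
  | zero => omega
  | succ k ih =>
    intro prev u t b hgap
    by_cases hk0 : k = 0
    · subst hk0
      rw [show prev + ((0 : Nat) + 1 : Nat) + 1 = (prev + 1) + 1 by push_cast; ring,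
        PySem.List.pyRange_one_singleton]
      simp only [List.foldl_cons, List.foldl_nil, pvStepA, pvFdiv_tri, Prod.mk.injEq]
      refine ⟨?_, ?_, ?_⟩
      · show u - pvTri t = u - pvG (0 + 1) t b
        simp [pvG]
      · push_cast; ring
      · push_cast; norm_num
    · have hk1 : 1 ≤ k := by omega
      rw [PySem.List.pyRange_one_cons (by push_cast; omega)]
      simp only [List.foldl_cons, pvStepA]
      have hz : v.getD (prev + 1) 0 = 0 := hgap _ (by omega) (by push_cast; omega)
      rw [hz, sub_zero]
      have ihh := ih hk1 (prev + 1) (u - PySem.Int.floordiv (t * (t - 1)) 2) (t - b) b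
        (by intro i h1 h2; exact hgap i (by omega) (by push_cast at h2 ⊢; omega))
      rw [show prev + ((k : Nat) + 1 : Nat) + 1 = (prev + 1) + (k : Nat) + 1 by push_cast; ring,
        ihh]
      simp only [pvG, pvFdiv_tri, Prod.mk.injEq]
      push_cast
      refine ⟨by ring, by ring, ?_⟩
      rw [show prev + ((k : Int) + 1) = prev + 1 + (k : Int) by ring]

-- ---- chaining segments: A's full range agrees with B's sorted-keys fold ----

theorem pvGetLastD_mem (S : List Int) (d : Int) (h : S ≠ []) : S.getLastD d ∈ S := by
  cases S with
  | nil => exact absurd rfl h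
  | cons a l => simp [List.getLastD_eq_getLast?, List.getLast?_eq_getLast_of_ne_nil]

theorem pvChain (v : PySem.Dict Int Int) :
    ∀ (S : List Int), S.Pairwise (· < ·) →
    ∀ (prev u t b : Int), (∀ L ∈ S, prev < L) →
      (∀ i : Int, prev < i → i ∉ S → v.getD i 0 = 0) →
    (S.foldl (pvStepB v) (u, t, b, prev)).2.2.2 = S.getLastD prev ∧
    (PySem.List.pyRange (prev + 1) (S.getLastD prev + 1) 1).foldl (pvStepA v) (u, t, b)
      = ((S.foldl (pvStepB v) (u, t, b, prev)).1,
         (S.foldl (pvStepB v) (u, t, b, prev)).2.1,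
         (S.foldl (pvStepB v) (u, t, b, prev)).2.2.1) := by
  intro S
  induction S with
  | nil =>
    intro _ prev u t b _ _
    simp [PySem.List.pyRange_one_eq_nil (le_refl (prev + 1))]
  | cons L S' ih =>
    intro hS prev u t b hgt hgap
    have hL : prev < L := hgt L (by simp)
    have hS' : S'.Pairwise (· < ·) := hS.tail
    have hLlt : ∀ x ∈ S', L < x := fun x hx => (List.pairwise_cons.mp hS).1 x hx
    set k : Nat := (L - prev).toNat with hkdef
    have hkc : (k : Int) = L - prev := by omega
    have hk1 : 1 ≤ k := by omega
    have hlast : L ≤ S'.getLastD L := by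
      by_cases h : S' = []
      · simp [h]
      · exact le_of_lt (hLlt _ (pvGetLastD_mem S' L h))
    -- the first step of B's fold is one whole segment
    have hstepB : pvStepB v (u, t, b, prev) L
        = (u - pvG k t b, t - b * (k : Int), b - v.getD L 0, L) := by
      show (u - PySem.Int.floordiv _ 2, t - b * (L - prev), b - v.getD L 0, L) = _
      rw [show L - prev = (k : Int) from hkc.symm, pvE_eq_G k t b]
    -- the matching k steps of A's fold
    have hseg := pvSegment v k hk1 prev u t b
      (by
        intro i h1 h2
        apply hgap i h1
        intro hmem
        rcases List.mem_cons.mp hmem with h | h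
        · omega
        · exact absurd (hLlt i h) (by omega))
    rw [show prev + (k : Int) + 1 = L + 1 by omega] at hseg
    rw [show prev + (k : Int) = L by omega] at hseg
    rw [show t - (k : Int) * b = t - b * (k : Int) by ring] at hseg
    have hgap' : ∀ i : Int, L < i → i ∉ S' → v.getD i 0 = 0 := by
      intro i h1 h2
      apply hgap i (by omega)
      intro hmem
      rcases List.mem_cons.mp hmem with h | h
      · omega
      · exact h2 h
    obtain ⟨ihlast, ihfold⟩ :=
      ih hS' L (u - pvG k t b) (t - b * (k : Int)) (b - v.getD L 0) hLlt hgap'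
    constructor
    · rw [List.foldl_cons, hstepB, List.getLastD_cons]
      exact ihlast
    · rw [List.getLastD_cons,
        PySem.List.pyRange_one_append (prev + 1) (L + 1) (S'.getLastD L + 1)
          (by omega) (by omega),
        List.foldl_append, hseg, List.foldl_cons, hstepB]
      exact ihfold

-- ---- the maximum key is the last element of the sorted keys ----

theorem pvLe_getLastD (S : List Int) (hS : S.Pairwise (· ≤ ·)) :
    ∀ d, ∀ x ∈ S, x ≤ S.getLastD d := by
  induction S with
  | nil => intro d x hx; simp at hx
  | cons a S' ih =>
    intro d x hx
    rw [List.getLastD_cons]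
    rcases List.mem_cons.mp hx with rfl | hx'
    · by_cases h : S' = []
      · simp [h]
      · exact (List.pairwise_cons.mp hS).1 _ (pvGetLastD_mem S' x h)
    · exact ih hS.tail a x hx'

theorem pvMax_eq_getLastD (ks : List Int) (hne : ks ≠ []) :
    (PySem.List.max? ks (fun x => x)).getD 0
      = (PySem.List.sorted ks (fun x => x) false).getLastD 0 := by
  set S := PySem.List.sorted ks (fun x => x) false with hSdef
  have hperm : S.Perm ks := PySem.List.sorted_perm ks (fun x => x) false
  have hSne : S ≠ [] := by
    intro h
    rw [h] at hperm
    exact hne (List.Perm.eq_nil hperm.symm)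
  obtain ⟨m, hm⟩ : ∃ m, PySem.List.max? ks (fun x => x) = some m := by
    cases h : PySem.List.max? ks (fun x => x) with
    | none => exact absurd ((PySem.List.max?_eq_none_iff ks (fun x => x)).mp h) hne
    | some m => exact ⟨m, rfl⟩
  rw [hm, Option.getD_some]
  have hmax : ∀ y ∈ ks, y ≤ m := fun y hy => PySem.List.max?_isMax hm y hy
  have hpw : S.Pairwise (· ≤ ·) := PySem.List.sorted_pairwise ks (fun x => x)
  have hlastmem : S.getLastD 0 ∈ ks := hperm.mem_iff.mp (pvGetLastD_mem S 0 hSne)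
  have h1 : S.getLastD 0 ≤ m := hmax _ hlastmem
  have h2 : m ≤ S.getLastD 0 :=
    pvLe_getLastD S hpw 0 m (hperm.mem_iff.mpr (PySem.List.max?_mem hm))
  omega

-- ---- per inner dict: A's body = B's body ----

-- what holds of every inner dict the two programs build: distinct, positive run lengths,
-- and at least one of them
def pvGoodInner (v : PySem.Dict Int Int) : Prop :=
  v.keys.Nodup ∧ v.keys ≠ [] ∧ ∀ k ∈ v.keys, (1 : Int) ≤ k

theorem pvInner_eq (u : Int) (v : PySem.Dict Int Int) (hv : pvGoodInner v) :
    pvInnerA u v = pvInnerB u v := by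
  obtain ⟨hnd, hne, hpos⟩ := hv
  set S := PySem.List.sorted v.keys (fun x => x) false with hSdef
  have hperm : S.Perm v.keys := PySem.List.sorted_perm v.keys (fun x => x) false
  have hpw : S.Pairwise (· ≤ ·) := PySem.List.sorted_pairwise v.keys (fun x => x)
  have hSnd : S.Nodup := hperm.nodup_iff.mpr hnd
  have hlt : S.Pairwise (· < ·) :=
    (List.Pairwise.and hpw hSnd).imp (fun h => lt_of_le_of_ne h.1 h.2)
  have h0 : ∀ L ∈ S, (0 : Int) < L := by
    intro L hL
    have := hpos L ((PySem.List.mem_sorted v.keys (fun x => x) false L).mp hL)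
    omega
  have hgap : ∀ i : Int, (0 : Int) < i → i ∉ S → v.getD i 0 = 0 := by
    intro i _ hni
    have hnk : i ∉ v.keys := fun h =>
      hni ((PySem.List.mem_sorted v.keys (fun x => x) false i).mpr h)
    apply PySem.Dict.getD_of_not_contains
    by_contra h
    simp only [Bool.not_eq_false] at h
    exact hnk ((PySem.Dict.contains_iff_mem_keys v i).mp h)
  have hm : (PySem.List.max? v.keys (fun x => x)).getD 0 = S.getLastD 0 :=
    pvMax_eq_getLastD v.keys hne
  obtain ⟨-, hfold⟩ := pvChain v S hlt 0 u
    ((v.items.map (fun p => p.1 * p.2)).sum) (v.values.sum) h0 hgap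
  rw [show ((0 : Int) + 1) = 1 by norm_num] at hfold
  show ((PySem.List.pyRange 1 ((PySem.List.max? v.keys (fun x => x)).getD 0 + 1) 1).foldl
      (pvStepA v) (u, (v.items.map (fun p => p.1 * p.2)).sum, v.values.sum)).1
    = (S.foldl (pvStepB v) (u, (v.items.map (fun p => p.1 * p.2)).sum, v.values.sum, 0)).1
  rw [hm, hfold]

-- ---- both programs build the same run-length dictionary ----

-- the run-length encoding of (a pending run of r copies of c) followed by l
def pvRuns : Char → Int → List Char → List (Char × Int)
  | c, r, [] => [(c, r)]
  | c, r, x :: xs => if x == c then pvRuns c (r + 1) xs else (c, r) :: pvRuns x 1 xs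

theorem pvStream_foldl (l : List Char) :
    ∀ (c : Char) (r : Int) (d : PySem.Dict Char (PySem.Dict Int Int)),
    pvAddRun (l.foldl pvStream (c, r, d)).2.2
        ((l.foldl pvStream (c, r, d)).1, (l.foldl pvStream (c, r, d)).2.1)
      = (pvRuns c r l).foldl pvAddRun d := by
  induction l with
  | nil => intro c r d; simp [pvRuns]
  | cons x xs ih =>
    intro c r d
    by_cases hx : (x == c) = true
    · simp only [List.foldl_cons, pvStream, pvRuns, hx, if_true]
      exact ih c (r + 1) d
    · simp only [List.foldl_cons, pvStream, pvRuns, hx, if_false, Bool.false_eq_true]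
      exact ih x 1 (pvAddRun d (c, r))

theorem pvRuns_groupby (l : List Char) :
    ∀ (c : Char) (r : Int),
    pvRuns c r l
      = (c, r + ((l.takeWhile (fun x => x == c)).length : Int))
          :: pvGroupby (l.dropWhile (fun x => x == c)) := by
  induction l with
  | nil => intro c r; simp [pvRuns, pvGroupby]
  | cons x xs ih =>
    intro c r
    by_cases hx : (x == c) = true
    · have ht : List.takeWhile (fun y => y == c) (x :: xs)
          = x :: List.takeWhile (fun y => y == c) xs := by
        simp [hx]
      have hd : List.dropWhile (fun y => y == c) (x :: xs)
          = List.dropWhile (fun y => y == c) xs := by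
        simp [hx]
      rw [ht, hd]
      simp only [pvRuns]
      rw [if_pos hx, ih c (r + 1)]
      congr 2
      simp only [List.length_cons]
      push_cast
      ring
    · have ht : List.takeWhile (fun y => y == c) (x :: xs) = [] := by
        simp [hx]
      have hd : List.dropWhile (fun y => y == c) (x :: xs) = x :: xs := by
        simp [hx]
      rw [ht, hd]
      simp only [pvRuns]
      rw [if_neg hx, ih x 1, ← pvGroupby]
      simp

theorem pvDict_eq (l : List Char) :
    pvBuildPer l = (pvGroupby l).foldl pvAddRun PySem.Dict.empty := by
  cases l with
  | nil => simp [pvBuildPer, pvGroupby]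
  | cons c rest =>
    show pvAddRun (rest.foldl pvStream (c, 1, PySem.Dict.empty)).2.2
        ((rest.foldl pvStream (c, 1, PySem.Dict.empty)).1,
         (rest.foldl pvStream (c, 1, PySem.Dict.empty)).2.1)
      = (pvGroupby (c :: rest)).foldl pvAddRun PySem.Dict.empty
    rw [pvStream_foldl rest c 1 PySem.Dict.empty, pvRuns_groupby rest c 1, pvGroupby]

-- ---- the invariant: every inner dict either program builds is pvGoodInner ----

theorem pvAddRun_good (d : PySem.Dict Char (PySem.Dict Int Int)) (p : Char × Int)
    (hp : (1 : Int) ≤ p.2) (h : ∀ v ∈ d.values, pvGoodInner v) :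
    ∀ v ∈ (pvAddRun d p).values, pvGoodInner v := by
  intro v hv
  unfold pvAddRun at hv
  rcases PySem.Dict.mem_values_insert _ _ _ _ hv with rfl | hv'
  · have hinner : pvGoodInner (d.getD p.1 PySem.Dict.empty) ∨
        d.getD p.1 PySem.Dict.empty = PySem.Dict.empty := by
      cases hg : d.get? p.1 with
      | none => right; rw [PySem.Dict.getD_eq_get?_getD, hg]; rfl
      | some w =>
        left
        rw [PySem.Dict.getD_eq_get?_getD, hg, Option.getD_some]
        apply h
        have hit := PySem.Dict.mem_items_of_get?_eq_some d hg
        show w ∈ d.items.map (·.2)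
        exact List.mem_map_of_mem hit
    set inner := d.getD p.1 PySem.Dict.empty with hidef
    refine ⟨?_, ?_, ?_⟩
    · apply PySem.Dict.nodup_keys_insert
      rcases hinner with hg | hg
      · exact hg.1
      · rw [hg, PySem.Dict.keys_empty]; exact List.nodup_nil
    · intro hkeys
      have : p.2 ∈ (inner.insert p.2 (inner.getD p.2 0 + 1)).keys :=
        (PySem.Dict.mem_keys_insert _ _ _ _).mpr (Or.inl rfl)
      rw [hkeys] at this
      exact absurd this (List.not_mem_nil)
    · intro k hk
      rcases (PySem.Dict.mem_keys_insert _ _ _ _).mp hk with rfl | hk'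
      · exact hp
      · rcases hinner with hg | hg
        · exact hg.2.2 k hk'
        · rw [hg, PySem.Dict.keys_empty] at hk'
          exact absurd hk' (List.not_mem_nil)
  · exact h v hv'

theorem pvFoldl_good (runs : List (Char × Int)) :
    ∀ (d : PySem.Dict Char (PySem.Dict Int Int)),
    (∀ p ∈ runs, (1 : Int) ≤ p.2) → (∀ v ∈ d.values, pvGoodInner v) →
    ∀ v ∈ (runs.foldl pvAddRun d).values, pvGoodInner v := by
  induction runs with
  | nil => intro d _ h; exact h
  | cons p rest ih =>
    intro d hpos h
    rw [List.foldl_cons]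
    exact ih (pvAddRun d p)
      (fun q hq => hpos q (List.mem_cons_of_mem p hq))
      (pvAddRun_good d p (hpos p (List.mem_cons_self)) h)

theorem pvGroupby_pos : ∀ (l : List Char), ∀ p ∈ pvGroupby l, (1 : Int) ≤ p.2 := by
  intro l
  induction l using pvGroupby.induct with
  | case1 =>
    intro p hp
    simp [pvGroupby] at hp
  | case2 c rest ih =>
    intro p hp
    rw [pvGroupby] at hp
    rcases List.mem_cons.mp hp with rfl | hp'
    · dsimp only
      omega
    · exact ih p hp'

-- ===== VERDICT (by name: the statement is the Claim_ definition above) =====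
theorem solution_spec : Claim_equal_solution := by
  intro s _
  show solution s = solution_alt s
  show ((pvGroupby s.toList).foldl pvAddRun PySem.Dict.empty).values.foldl pvInnerA
      (PySem.Int.floordiv
        ((PySem.Str.len s - 1) * PySem.Str.len s * (PySem.Str.len s + 1)) 6)
    = (pvBuildPer s.toList).values.foldl pvInnerB
      (PySem.Int.floordiv
        ((PySem.Str.len s - 1) * PySem.Str.len s * (PySem.Str.len s + 1)) 6)
  rw [pvDict_eq]
  exact PySem.List.foldl_congr_mem _ pvInnerA pvInnerB _
    (fun acc v hv => pvInner_eq acc v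
      (pvFoldl_good (pvGroupby s.toList) PySem.Dict.empty (pvGroupby_pos s.toList)
        (fun w hw => nomatch hw) v hv))
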